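-- pv_equiv track=rewrite | github.com/yokeTH/eng-com-prog-cu | grader/part-III/Part-III-★★★-Ascii-Text.py | stripAll
-- ===== SOURCE A (Python) =====
-- def stripAll(lns:list):
--     dotIndex = list(range(len(lns[0])))
--     for ln in lns:
--         for i in range(len(ln)):
--             if ln[i] != '.' and i in dotIndex:
--                 dotIndex.remove(i)
--     ans = []
--     for ln in lns:
--         new = ''
--         for i in range(len(ln)):
--             if i not in dotIndex:
--                 new+= ln[i]
--         ans.append(new+'')
--     return ans
-- ===== SOURCE B (Python) =====
-- def stripAll(lns: list):
--     # Simultaneous column-by-column recursion: peel the head column off every row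
--     # at once; drop it when no row has a non-dot there, keep it otherwise; once the
--     # first row is exhausted, the remaining tails are kept verbatim.
--     def go(rows):
--         if not rows[0]:
--             return [r[:] for r in rows]
--         rest = go([r[1:] for r in rows])
--         if any(r and r[0] != '.' for r in rows):
--             return [([r[0]] + t if r else t) for r, t in zip(rows, rest)]
--         return rest
--     return [''.join(r) for r in go([list(ln) for ln in lns])]
-- ===== Notes on version B (the rewrite author's own statement) =====
-- stated objective: alternative
-- what changed: A computes a removal index set (starting from all indices of line 0 and destructively erasing during a row-major cell sweep) and then rebuilds each line by index-membership tests; B uses no index sets at all: one simultaneous recursion peels the head column off every row at once, dropping or keeping the whole column per step and appending leftover tails verbatim when the first row runs out.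
-- outside the precondition, e.g. on stripAll([]): A raises IndexError, B raises IndexError
import Mathlib
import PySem

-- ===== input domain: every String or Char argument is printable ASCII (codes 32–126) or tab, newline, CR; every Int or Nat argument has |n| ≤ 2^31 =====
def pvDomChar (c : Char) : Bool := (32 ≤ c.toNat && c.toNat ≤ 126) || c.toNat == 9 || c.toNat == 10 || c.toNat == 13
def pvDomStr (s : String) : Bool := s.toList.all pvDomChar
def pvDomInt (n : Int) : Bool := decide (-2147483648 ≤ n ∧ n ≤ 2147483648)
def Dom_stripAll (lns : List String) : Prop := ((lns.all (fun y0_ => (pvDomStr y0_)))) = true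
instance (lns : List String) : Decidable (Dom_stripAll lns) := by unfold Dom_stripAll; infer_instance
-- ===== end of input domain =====

-- B replaces A's destructive index-set sweep by a simultaneous column-by-column recursion
-- (peel the head column off every row at once, drop it iff all-dots): an alternative
-- algorithm with no index sets.


-- ===== PORT A =====
def stripAll (lns : List String) : List String :=
  match lns with
  | [] => []          -- unreachable under Pre_ (lns[0] raises IndexError in Python)
  | l0 :: _ =>
    let css := lns.map String.toList
    let dot := css.foldl
      (fun d cs =>
        (PySem.List.pyRange 0 (cs.length : Int) 1).foldl
          (fun d i => if PySem.List.pyGetD cs i '.' ≠ '.' ∧ i ∈ d then d.erase i else d) d)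
      (PySem.List.pyRange 0 (l0.toList.length : Int) 1)
    css.map (fun cs =>
      String.ofList ((PySem.List.pyRange 0 (cs.length : Int) 1).foldl
        (fun new i => if i ∉ dot then new ++ [PySem.List.pyGetD cs i '.'] else new) []))

-- ===== PORT B =====
-- Source B's 'go(rows)': the recursion is driven by rows[0] (Python tests 'not rows[0]');
-- the driving suffix is passed as an explicit first argument for termination — at every
-- call site it IS the first element of rows, so the computation is the same.
def goB : List Char → List (List Char) → List (List Char)
  | [], rows => rows                                   -- 'return [r[:] for r in rows]'
  | _ :: r0t, rows =>                                  -- 'rest = go([r[1:] for r in rows])'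
    if rows.any (fun r => !r.isEmpty && decide (r.headD '.' ≠ '.')) then
      (rows.zip (goB r0t (rows.map List.tail))).map
        (fun p => match p.1 with | [] => p.2 | c :: _ => c :: p.2)
    else goB r0t (rows.map List.tail)

def stripAll_alt (lns : List String) : List String :=
  match lns with
  | [] => []          -- unreachable under Pre_ (rows[0] raises IndexError in Python)
  | l0 :: _ =>
    (goB l0.toList (lns.map String.toList)).map String.ofList

-- ===== PRECONDITION & SPEC =====
-- Pre_ excludes only the empty list, on which both Pythons raise IndexError.
def Pre_stripAll (lns : List String) : Prop := lns ≠ []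
instance (lns : List String) : Decidable (Pre_stripAll lns) := by unfold Pre_stripAll; infer_instance
def pvWitness_stripAll : List String := ["a.c.", ".b..", ".d"]
def Spec_stripAll (lns : List String) (out : List String) : Prop := out = stripAll_alt lns
instance (lns : List String) (out : List String) : Decidable (Spec_stripAll lns out) := by unfold Spec_stripAll; infer_instance

-- ===== CLAIM (what is proved, stated in full; the proofs are below) =====
def Claim_equal_stripAll : Prop := ∀ (lns : List String), Dom_stripAll lns → Pre_stripAll lns → Spec_stripAll lns (stripAll lns)

-- ===== LEMMAS AND PROOFS =====

-- ---- A side: reduce the destructive sweep to a filter ----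

-- A's inner erase loop over any index list equals one filter (for Nodup d).
theorem foldl_erase_eq_filter {α : Type} [DecidableEq α] (bad : α → Prop) [DecidablePred bad] :
    ∀ (is : List α) (d : List α), d.Nodup →
      is.foldl (fun d i => if bad i ∧ i ∈ d then d.erase i else d) d
        = d.filter (fun j => decide ¬(j ∈ is ∧ bad j)) := by
  intro is
  induction is with
  | nil => intro d _; simp
  | cons i is ih =>
    intro d hd
    have hstep : (if bad i ∧ i ∈ d then d.erase i else d)
        = d.filter (fun j => decide ¬(j = i ∧ bad i)) := by
      by_cases hb : bad i
      · by_cases hm : i ∈ d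
        · rw [if_pos ⟨hb, hm⟩, hd.erase_eq_filter]
          apply List.filter_congr
          intro j _; by_cases h : j = i <;> simp [hb, bne, h]
        · rw [if_neg (by tauto)]
          symm; apply List.filter_eq_self.mpr
          intro j hj; simp
          exact Or.inl (fun h => hm (h ▸ hj))
      · rw [if_neg (by tauto)]
        symm; apply List.filter_eq_self.mpr
        intro j _; simp [hb]
    rw [List.foldl_cons, hstep, ih _ (hd.filter _), List.filter_filter]
    apply List.filter_congr
    intro j _
    by_cases h1 : j = i <;> by_cases h2 : bad j <;> by_cases h3 : j ∈ is <;>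
      simp [h1, h2, h3] <;> subst h1 <;> simp_all

-- the per-column survive test: column j is all-dots in row cs
def keepB (cs : List Char) (j : Int) : Bool :=
  decide ((cs.length : Int) ≤ j) || decide (PySem.List.pyGetD cs j '.' = '.')

-- one line of A's sweep: the erase loop keeps exactly the columns keepB keeps (on nonneg indices).
theorem inner_eq (cs : List Char) (d : List Int) (hd : d.Nodup) (hpos : ∀ j ∈ d, 0 ≤ j) :
    (PySem.List.pyRange 0 (cs.length : Int) 1).foldl
        (fun d i => if PySem.List.pyGetD cs i '.' ≠ '.' ∧ i ∈ d then d.erase i else d) d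
      = d.filter (keepB cs) := by
  rw [foldl_erase_eq_filter (fun i => PySem.List.pyGetD cs i '.' ≠ '.') _ d hd]
  apply List.filter_congr
  intro j hj
  have h0 : (0:Int) ≤ j := hpos j hj
  by_cases hlt : j < (cs.length : Int)
  · simp [keepB, PySem.List.mem_pyRange_one, h0, hlt, not_le.mpr hlt]
  · simp [keepB, PySem.List.mem_pyRange_one, hlt, not_lt.mp hlt]

-- A's whole sweep equals one filter by 'all rows keep'.
theorem outer_eq : ∀ (css : List (List Char)) (d : List Int), d.Nodup → (∀ j ∈ d, 0 ≤ j) →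
    css.foldl
        (fun d cs =>
          (PySem.List.pyRange 0 (cs.length : Int) 1).foldl
            (fun d i => if PySem.List.pyGetD cs i '.' ≠ '.' ∧ i ∈ d then d.erase i else d) d) d
      = d.filter (fun j => css.all (fun cs => keepB cs j)) := by
  intro css
  induction css with
  | nil => intro d _ _; simp
  | cons cs css ih =>
    intro d hd hpos
    rw [List.foldl_cons, inner_eq cs d hd hpos,
        ih _ (hd.filter _) (fun j hj => hpos j (List.mem_of_mem_filter hj)),
        List.filter_filter]
    apply List.filter_congr
    intro j _; simp [Bool.and_comm]

-- phase 2 of A: the append loop over one line equals an enumerate-filter-map.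
theorem line_eq (cs : List Char) (k : List Int) :
    ((PySem.List.pyRange 0 (cs.length : Int) 1).foldl
        (fun new i => if i ∉ k then new ++ [PySem.List.pyGetD cs i '.'] else new) [])
      = ((PySem.List.enumerate cs).filter (fun p => decide (p.1 ∉ k))).map (·.2) := by
  rw [PySem.List.foldl_append_ite (fun i => i ∉ k) (fun i => PySem.List.pyGetD cs i '.'),
      PySem.List.enumerate_eq_map_pyRange cs '.', List.filter_map, List.map_map]
  simp [Function.comp_def]

-- ---- B side: characterise goB by a per-column predicate ----

-- column i survives: beyond line 0's width, or some row has a non-dot there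
def Pcol (w : Int) (rows : List (List Char)) (i : Int) : Bool :=
  decide (w ≤ i) ||
    rows.any (fun s => decide (i < (s.length : Int)) && decide (PySem.List.pyGetD s i '.' ≠ '.'))

-- membership-based congruence for List.any
theorem any_congr_mem {α : Type} (l : List α) (p q : α → Bool) (h : ∀ a ∈ l, p a = q a) :
    l.any p = l.any q := by
  induction l with
  | nil => rfl
  | cons a l ih => simp_all

-- zipping a list with a mapped copy of itself is a single map
theorem zip_self_map {α β : Type} (l : List α) (g : α → β) :
    l.zip (l.map g) = l.map (fun a => (a, g a)) := by
  induction l with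
  | nil => rfl
  | cons a l ih => simp [ih]

-- shifting the enumeration start by one shifts the predicate's index
theorem filter_enumerate_shift {α : Type} (t : List α) (s : Int) (Q : Int → Bool) :
    ((PySem.List.enumerate t (s+1)).filter (fun p => Q p.1)).map (·.2)
      = ((PySem.List.enumerate t s).filter (fun p => Q (p.1+1))).map (·.2) := by
  induction t generalizing s with
  | nil => simp [PySem.List.enumerate_nil]
  | cons c t ih =>
    rw [PySem.List.enumerate_cons, PySem.List.enumerate_cons,
        List.filter_cons, List.filter_cons]
    have key := ih (s+1)
    rw [show s + 1 + 1 = (s + 1) + 1 from rfl] at key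
    by_cases h : Q (s+1) = true
    · rw [if_pos (by simpa using h), if_pos (by simpa using h),
          List.map_cons, List.map_cons, key]
    · rw [if_neg (by simpa using h), if_neg (by simpa using h), key]

-- the Pcol predicate shifts under tailing all rows (for nonneg i)
theorem Pcol_tail (w : Int) (rows : List (List Char)) (i : Int) (h0 : 0 ≤ i) :
    Pcol w (rows.map List.tail) i = Pcol (w+1) rows (i+1) := by
  unfold Pcol
  have h1 : decide (w ≤ i) = decide (w+1 ≤ i+1) := by rw [decide_eq_decide]; omega
  have h2 : (rows.map List.tail).any
        (fun s => decide (i < (s.length : Int)) && decide (PySem.List.pyGetD s i '.' ≠ '.'))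
      = rows.any
        (fun s => decide (i+1 < (s.length : Int)) && decide (PySem.List.pyGetD s (i+1) '.' ≠ '.')) := by
    rw [List.any_map]
    apply any_congr_mem
    intro s _
    match s with
    | [] =>
      simp only [List.tail_nil, Function.comp, List.length_nil, Nat.cast_zero]
      rw [decide_eq_false (by omega : ¬ (i < (0:Int))),
          decide_eq_false (by omega : ¬ (i + 1 < (0:Int)))]
      simp
    | a :: u =>
      simp only [List.tail_cons, Function.comp]
      by_cases hlt : i < (u.length : Int)
      · have hg : PySem.List.pyGetD (a :: u) (i+1) '.' = PySem.List.pyGetD u i '.' := by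
          rw [PySem.List.pyGetD_eq_getElem (a :: u) '.' (by omega) (by simp; omega),
              PySem.List.pyGetD_eq_getElem u '.' h0 (by exact_mod_cast hlt)]
          have ht : (i+1).toNat = i.toNat + 1 := by omega
          simp [ht]
        have hlt2 : i + 1 < ((a :: u).length : Int) := by simp; omega
        simp [hlt, hg]
      · have hlt2 : ¬ (i + 1 < ((a :: u).length : Int)) := by simp at hlt ⊢; omega
        simp [hlt]
  rw [h1, h2]

-- main characterisation: goB filters every row by the column predicate
theorem goB_eq (r0 : List Char) : ∀ rows : List (List Char),
    goB r0 rows = rows.map (fun r =>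
      ((PySem.List.enumerate r).filter (fun p => Pcol (r0.length : Int) rows p.1)).map (·.2)) := by
  induction r0 with
  | nil =>
    intro rows
    have h : ∀ r ∈ rows, id r = ((PySem.List.enumerate r).filter
        (fun p => Pcol ((([]:List Char).length : Int)) rows p.1)).map (·.2) := by
      intro r _
      have hf : (PySem.List.enumerate r).filter (fun p => Pcol ((([]:List Char).length : Int)) rows p.1)
          = PySem.List.enumerate r := by
        apply List.filter_eq_self.mpr
        intro p hp
        rcases (PySem.List.mem_enumerate_iff _ _ _).mp hp with ⟨k, hk, rfl⟩
        simp [Pcol]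
      rw [hf, PySem.List.map_snd_enumerate]
      rfl
    rw [show goB [] rows = rows from rfl, ← List.map_congr_left h, List.map_id]
  | cons c0 r0t ih =>
    intro rows
    have hhead : Pcol (((c0 :: r0t).length : Int)) rows 0
        = rows.any (fun r => !r.isEmpty && decide (r.headD '.' ≠ '.')) := by
      unfold Pcol
      rw [decide_eq_false (by simp : ¬ (((c0 :: r0t).length : Int) ≤ 0)), Bool.false_or]
      apply any_congr_mem
      intro s _
      match s with
      | [] => simp
      | b :: u =>
        simp [PySem.List.pyGetD_zero]
    have htail : ∀ t : List Char,
        ((PySem.List.enumerate t).filter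
          (fun p => Pcol ((r0t.length : Int)) (rows.map List.tail) p.1)).map (·.2)
        = ((PySem.List.enumerate t (0+1)).filter
          (fun p => Pcol (((c0 :: r0t).length : Int)) rows p.1)).map (·.2) := by
      intro t
      rw [filter_enumerate_shift t 0 (fun i => Pcol (((c0 :: r0t).length : Int)) rows i)]
      congr 1
      apply List.filter_congr
      intro p hp
      rcases (PySem.List.mem_enumerate_iff _ _ _).mp hp with ⟨k, hk, rfl⟩
      rw [Pcol_tail _ _ _ (by simp : (0:Int) ≤ 0 + (k:Int))]
      congr 1
    unfold goB
    rw [ih (rows.map List.tail), List.map_map]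
    by_cases hkeep : rows.any (fun r => !r.isEmpty && decide (r.headD '.' ≠ '.')) = true
    · rw [if_pos hkeep, zip_self_map, List.map_map]
      apply List.map_congr_left
      intro r _
      simp only [Function.comp]
      match r with
      | [] => simp [PySem.List.enumerate_nil]
      | c :: t =>
        have h0 : Pcol (((c0 :: r0t).length : Int)) rows 0 = true := hhead.trans hkeep
        rw [PySem.List.enumerate_cons, List.filter_cons, if_pos (by simpa using h0),
            List.map_cons, List.tail_cons]
        rw [htail t]
    · rw [if_neg hkeep]
      apply List.map_congr_left
      intro r _
      simp only [Function.comp]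
      match r with
      | [] => simp [PySem.List.enumerate_nil]
      | c :: t =>
        have h0 : Pcol (((c0 :: r0t).length : Int)) rows 0 = false := by
          rw [hhead]; simpa using hkeep
        rw [PySem.List.enumerate_cons, List.filter_cons, if_neg (by simpa using h0),
            List.tail_cons]
        rw [htail t]

-- the membership test against A's kill list equals the column predicate (nonneg i)
theorem not_mem_kill_iff (css : List (List Char)) (w : Int) (i : Int) (h0 : 0 ≤ i) :
    decide (i ∉ (PySem.List.pyRange 0 w 1).filter (fun j => css.all (fun cs => keepB cs j)))
      = Pcol w css i := by
  have hmem : i ∈ (PySem.List.pyRange 0 w 1).filter (fun j => css.all (fun cs => keepB cs j))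
      ↔ (i < w ∧ ∀ s ∈ css, keepB s i = true) := by
    rw [List.mem_filter, PySem.List.mem_pyRange_one, List.all_eq_true]
    constructor
    · rintro ⟨⟨_, h⟩, h2⟩; exact ⟨h, h2⟩
    · rintro ⟨h, h2⟩; exact ⟨⟨h0, h⟩, h2⟩
  have hpc : Pcol w css i = true ↔ (w ≤ i ∨ ∃ s ∈ css, ¬ keepB s i = true) := by
    simp [Pcol, keepB, List.any_eq_true, not_le, not_or]
  by_cases hm : i ∈ (PySem.List.pyRange 0 w 1).filter (fun j => css.all (fun cs => keepB cs j))
  · have h1 := hmem.mp hm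
    have hP : Pcol w css i = false := by
      have hnt : ¬ (Pcol w css i = true) := by
        rw [hpc]
        rintro (h | ⟨s, hs, hk⟩)
        · omega
        · exact hk (h1.2 s hs)
      simpa using hnt
    simp [hm, hP]
  · have hP : Pcol w css i = true := by
      rw [hpc]
      by_cases hlt : i < w
      · rcases Classical.em (∀ s ∈ css, keepB s i = true) with hall | hnall
        · exact absurd (hmem.mpr ⟨hlt, hall⟩) hm
        · right
          push Not at hnall
          exact hnall
      · left; omega
    simp [hm, hP]

-- ===== VERDICT (by name: the statement is the Claim_ definition above) =====
theorem stripAll_spec : Claim_equal_stripAll := by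
  intro lns _ hpre
  unfold Spec_stripAll stripAll stripAll_alt
  match lns with
  | [] => exact absurd rfl hpre
  | l0 :: rest =>
    simp only []
    rw [outer_eq _ _ (PySem.List.nodup_pyRange_one 0 _)
        (fun j hj => ((PySem.List.mem_pyRange_one).mp hj).1)]
    rw [goB_eq, List.map_map, List.map_map, List.map_map]
    apply List.map_congr_left
    intro s _
    simp only [Function.comp]
    rw [line_eq]
    congr 1
    congr 1
    apply List.filter_congr
    intro p hp
    rcases (PySem.List.mem_enumerate_iff _ _ _).mp hp with ⟨k, hk, rfl⟩
    rw [not_mem_kill_iff _ _ _ (by simp)]
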